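-- pv_equiv track=rewrite | github.com/jwdai1/burger-wars | generate_tectonic.py | build_country_clusters
-- ===== SOURCE A (Python) =====
-- def build_country_clusters(stores, countries):
--     """
--     Group stores by country. Returns dict: country_code → list of stores.
--     Sorted by total store count descending (largest countries first in treemap).
--     """
--     clusters = {}
--     for s in stores:
--         code = s["country"]
--         if code not in clusters:
--             clusters[code] = []
--         clusters[code].append(s)
--
--     sorted_clusters = dict(
--         sorted(clusters.items(), key=lambda kv: len(kv[1]), reverse=True)
--     )
--     return sorted_clusters
-- ===== SOURCE B (Python) =====
-- def build_country_clusters(stores, countries):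
--     """
--     Group stores by country. Returns dict: country_code -> list of stores.
--     Sorted by total store count descending, via a counting/bucket pass
--     instead of a comparison sort.
--     """
--     clusters = {}
--     for s in stores:
--         code = s["country"]
--         if code not in clusters:
--             clusters[code] = []
--         clusters[code].append(s)
--
--     items = list(clusters.items())
--     maxc = 0
--     for kv in items:
--         if len(kv[1]) > maxc:
--             maxc = len(kv[1])
--     buckets = {}
--     for kv in items:
--         buckets.setdefault(len(kv[1]), []).append(kv)
--     pairs = []
--     for c in reversed(range(1, maxc + 1)):
--         for kv in buckets.get(c, []):
--             pairs.append(kv)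
--     return dict(pairs)
-- ===== Notes on version B (the rewrite author's own statement) =====
-- stated objective: alternative
-- what changed: Replaces the comparison sort of the country groups by a counting/bucket sort: groups are distributed into buckets indexed by their store count and emitted from the largest count down, preserving first-seen order inside each bucket.
import Mathlib
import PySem

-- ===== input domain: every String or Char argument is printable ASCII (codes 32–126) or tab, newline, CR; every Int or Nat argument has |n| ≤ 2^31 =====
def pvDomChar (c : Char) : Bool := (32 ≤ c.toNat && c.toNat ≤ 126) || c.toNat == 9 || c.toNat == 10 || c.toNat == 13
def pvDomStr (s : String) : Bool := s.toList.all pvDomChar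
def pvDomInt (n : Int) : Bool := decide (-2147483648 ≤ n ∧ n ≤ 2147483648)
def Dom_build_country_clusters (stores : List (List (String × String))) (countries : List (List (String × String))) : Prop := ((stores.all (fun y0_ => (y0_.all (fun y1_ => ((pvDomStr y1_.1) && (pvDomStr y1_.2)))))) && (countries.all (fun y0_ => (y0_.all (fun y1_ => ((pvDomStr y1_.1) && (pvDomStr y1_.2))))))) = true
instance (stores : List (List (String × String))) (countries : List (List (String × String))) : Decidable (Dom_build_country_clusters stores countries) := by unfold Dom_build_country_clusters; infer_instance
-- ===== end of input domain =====

-- B replaces A's comparison sort of the groups by a counting/bucket sort over the store counts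
-- (same value, incl. tie order; objective: alternative algorithm, no speed claim).
-- Both ports share pvGroup, the transliteration of the (identical) grouping loop of Source A and Source B.

-- the grouping loop of both Pythons: clusters = {}; for s in stores: code = s["country"];
-- if code not in clusters: clusters[code] = []; clusters[code].append(s)
def pvGroup (stores : List (List (String × String))) : PySem.Dict String (List (List (String × String))) :=
  stores.foldl (fun d s =>
    let code := (PySem.Dict.mk s).getD "country" ""
    let d' := if d.contains code then d else d.insert code ([] : List (List (String × String)))
    d'.modify code [] (fun l => l ++ [s])) PySem.Dict.empty

-- ===== PORT A =====
def build_country_clusters (stores : List (List (String × String))) (countries : List (List (String × String))) : List (String × List (List (String × String))) :=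
  let clusters := pvGroup stores
  (PySem.Dict.ofList (PySem.List.sorted clusters.items (fun kv => (kv.2.length : Int)) true)).items

-- ===== PORT B =====
def build_country_clusters_alt (stores : List (List (String × String))) (countries : List (List (String × String))) : List (String × List (List (String × String))) :=
  let clusters := pvGroup stores
  let items := clusters.items
  let maxc : Int := items.foldl (fun m kv => if (kv.2.length : Int) > m then (kv.2.length : Int) else m) 0
  let buckets := items.foldl (fun d kv => d.modify (kv.2.length : Int) [] (fun l => l ++ [kv]))
    (PySem.Dict.empty : PySem.Dict Int (List (String × List (List (String × String)))))
  let pairs := ((PySem.List.pyRange 1 (maxc + 1) 1).reverse).foldl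
    (fun acc c => (buckets.getD c []).foldl (fun acc kv => acc ++ [kv]) acc) []
  (PySem.Dict.ofList pairs).items

-- ===== PRECONDITION & SPEC =====
-- Pre_ excludes exactly the stores without a "country" key, on which Python A raises KeyError.
def Pre_build_country_clusters (stores : List (List (String × String))) (countries : List (List (String × String))) : Prop :=
  ∀ s ∈ stores, "country" ∈ s.map Prod.fst
instance (stores : List (List (String × String))) (countries : List (List (String × String))) : Decidable (Pre_build_country_clusters stores countries) := by unfold Pre_build_country_clusters; infer_instance
def pvWitness_build_country_clusters : (List (List (String × String))) × (List (List (String × String))) :=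
  ([[("country", "US"), ("name", "a")], [("country", "DE")], [("country", "US")]], [])

def Spec_build_country_clusters (stores : List (List (String × String))) (countries : List (List (String × String))) (out : List (String × List (List (String × String)))) : Prop := out = build_country_clusters_alt stores countries
instance (stores : List (List (String × String))) (countries : List (List (String × String))) (out : List (String × List (List (String × String)))) : Decidable (Spec_build_country_clusters stores countries out) := by unfold Spec_build_country_clusters; infer_instance

-- ===== CLAIM (what is proved, stated in full; the proofs are below) =====
def Claim_equal_build_country_clusters : Prop := ∀ (stores : List (List (String × String))) (countries : List (List (String × String))), Dom_build_country_clusters stores countries → Pre_build_country_clusters stores countries → Spec_build_country_clusters stores countries (build_country_clusters stores countries)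

-- ===== LEMMAS AND PROOFS =====

-- insertBy unfolding on a cons
theorem pv_insertBy_cons {α : Type} (before : α → α → Bool) (x y : α) (ys : List α) :
    PySem.List.insertBy before x (y :: ys) =
      if before x y then x :: y :: ys else y :: PySem.List.insertBy before x ys := rfl

theorem pv_insertBy_nil {α : Type} (before : α → α → Bool) (x : α) :
    PySem.List.insertBy before x [] = [x] := rfl

-- stability step: inserting into a descending list keeps every key-class's order,
-- the new element landing at the end of its class
theorem pv_filter_insertBy {α : Type} (key : α → Int) (c : Int) (x : α) :
    ∀ (acc : List α), acc.Pairwise (fun a b => key b ≤ key a) →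
    (PySem.List.insertBy (fun a b => decide (key b < key a)) x acc).filter (fun y => decide (key y = c))
      = acc.filter (fun y => decide (key y = c)) ++ (if key x = c then [x] else []) := by
  intro acc
  induction acc with
  | nil =>
      intro _
      rw [pv_insertBy_nil]
      by_cases hxc : key x = c
      · simp [List.filter, hxc]
      · simp [List.filter, hxc]
  | cons y ys ih =>
      intro hp
      rw [List.pairwise_cons] at hp
      obtain ⟨hy, hys⟩ := hp
      rw [pv_insertBy_cons]
      by_cases hlt : key y < key x
      · rw [if_pos (by simpa using hlt)]
        by_cases hxc : key x = c
        · have hnil : (y :: ys).filter (fun z => decide (key z = c)) = [] := by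
            rw [List.filter_eq_nil_iff]
            intro z hz
            have hzc : key z < c := by
              rcases hz with _ | hz
              · omega
              · have := hy z (by assumption)
                omega
            simp
            omega
          rw [List.filter_cons_of_pos (by simp [hxc]), hnil, if_pos hxc]
          simp
        · rw [List.filter_cons_of_neg (by simp [hxc]), if_neg hxc, List.append_nil]
      · rw [if_neg (by simpa using hlt)]
        rw [List.filter_cons, List.filter_cons, ih hys]
        split <;> simp

-- stability of Python's reverse sort: each key-class keeps its input order
theorem pv_filter_sorted_rev {α : Type} (key : α → Int) (c : Int) (xs : List α) :
    (PySem.List.sorted xs key true).filter (fun y => decide (key y = c))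
      = xs.filter (fun y => decide (key y = c)) := by
  induction xs using List.reverseRecOn with
  | nil => rfl
  | append_singleton xs x ih =>
      have hs : PySem.List.sorted (xs ++ [x]) key true
          = PySem.List.insertBy (fun a b => decide (key b < key a)) x (PySem.List.sorted xs key true) := by
        rw [PySem.List.sorted_rev_eq_foldl_insertBy, PySem.List.sorted_rev_eq_foldl_insertBy,
          List.foldl_append]
        rfl
      rw [hs, pv_filter_insertBy key c x _ (PySem.List.sorted_pairwise_rev xs key),
        ih, List.filter_append]
      congr 1
      simp [List.filter]
      split_ifs <;> simp_all

-- uniqueness: a key-descending list is determined by its key-classes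
theorem pv_eq_of_pairwise_of_filter_eq {α : Type} (key : α → Int) :
    ∀ (ys zs : List α), ys.Pairwise (fun a b => key b ≤ key a) →
      zs.Pairwise (fun a b => key b ≤ key a) →
      (∀ c, ys.filter (fun y => decide (key y = c)) = zs.filter (fun y => decide (key y = c))) →
      ys = zs := by
  intro ys
  induction ys with
  | nil =>
      intro zs _ _ hf
      cases zs with
      | nil => rfl
      | cons z zs' =>
          have := hf (key z)
          simp [List.filter] at this
  | cons y ys' ih =>
      intro zs hy hz hf
      cases zs with
      | nil =>
          have := hf (key y)
          simp [List.filter] at this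
      | cons z zs' =>
          rw [List.pairwise_cons] at hy hz
          obtain ⟨hy1, hy2⟩ := hy
          obtain ⟨hz1, hz2⟩ := hz
          have hy_mem : y ∈ (z :: zs').filter (fun w => decide (key w = key y)) := by
            rw [← hf (key y)]; simp
          have hz_mem : z ∈ (y :: ys').filter (fun w => decide (key w = key z)) := by
            rw [hf (key z)]; simp
          rw [List.mem_filter] at hy_mem hz_mem
          have hle1 : key y ≤ key z := by
            rcases List.mem_cons.1 hy_mem.1 with h | h
            · rw [h]
            · exact hz1 y h
          have hle2 : key z ≤ key y := by
            rcases List.mem_cons.1 hz_mem.1 with h | h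
            · rw [h]
            · exact hy1 z h
          have hkey : key y = key z := le_antisymm hle1 hle2
          -- y = z
          have h0 := hf (key y)
          rw [List.filter_cons_of_pos (by simp), List.filter_cons_of_pos (by simp [← hkey])] at h0
          injection h0 with hyz htl
          subst hyz
          congr 1
          apply ih zs' hy2 hz2
          intro c
          by_cases hc : key y = c
          · subst hc; exact htl
          · have h := hf c
            rwa [List.filter_cons_of_neg (by simpa using hc),
              List.filter_cons_of_neg (by simpa [← hkey] using hc)] at h

-- the flatMap of key-classes along strictly decreasing counts is key-descending
theorem pv_pairwise_flatMap {α : Type} (key : α → Int) (xs : List α) :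
    ∀ (cs : List Int), cs.Pairwise (fun a b => b < a) →
    (cs.flatMap (fun c => xs.filter (fun y => decide (key y = c)))).Pairwise
      (fun a b => key b ≤ key a) := by
  intro cs
  induction cs with
  | nil => intro _; simp
  | cons c cs' ih =>
      intro hp
      rw [List.pairwise_cons] at hp
      obtain ⟨hc, hcs⟩ := hp
      rw [List.flatMap_cons]
      apply List.pairwise_append.2
      refine ⟨?_, ih hcs, ?_⟩
      · -- a constant-key chunk is trivially descending
        have hconst : ∀ (l : List α), (l.filter (fun y => decide (key y = c))).Pairwise
            (fun a b => key b ≤ key a) := by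
          intro l
          induction l with
          | nil => simp
          | cons a t iht =>
              rw [List.filter_cons]
              split
              · refine List.Pairwise.cons ?_ iht
                intro b hb
                rw [List.mem_filter] at hb
                have h1 : key a = c := by simp_all
                have h2 : key b = c := by
                  have := hb.2
                  simpa using this
                omega
              · exact iht
        exact hconst xs
      · intro a ha b hb
        rw [List.mem_filter] at ha
        rw [List.mem_flatMap] at hb
        obtain ⟨c', hc', hb⟩ := hb
        rw [List.mem_filter] at hb
        have h3 := hc c' hc'
        have h1 : key a = c := by simpa using ha.2
        have h2 : key b = c' := by simpa using hb.2
        omega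

-- filter of the flatMap of key-classes over nodup counts
theorem pv_filter_flatMap {α : Type} (key : α → Int) (xs : List α) :
    ∀ (cs : List Int), cs.Nodup → ∀ (c0 : Int),
    (cs.flatMap (fun c => xs.filter (fun y => decide (key y = c)))).filter
        (fun y => decide (key y = c0))
      = if c0 ∈ cs then xs.filter (fun y => decide (key y = c0)) else [] := by
  intro cs
  induction cs with
  | nil => intro _ c0; simp
  | cons c cs' ih =>
      intro hnd c0
      rw [List.nodup_cons] at hnd
      obtain ⟨hc, hnd'⟩ := hnd
      rw [List.flatMap_cons, List.filter_append, ih hnd' c0]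
      by_cases h0 : c0 = c
      · subst h0
        rw [if_neg hc, if_pos (by simp), List.append_nil, List.filter_filter]
        congr 1
        funext a
        simp
      · rw [List.filter_filter]
        have : (xs.filter fun a => decide (key a = c0) && decide (key a = c)) = [] := by
          rw [List.filter_eq_nil_iff]
          intro z _
          simp
          omega
        rw [this, List.nil_append]
        by_cases hm : c0 ∈ cs'
        · rw [if_pos hm, if_pos (by simp [hm])]
        · rw [if_neg hm, if_neg (by simp [h0, hm])]

-- every cluster value is nonempty
theorem pv_group_values_ne_nil (stores : List (List (String × String))) :
    ∀ kv ∈ (pvGroup stores).items, kv.2 ≠ [] := by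
  unfold pvGroup
  suffices h : ∀ (l : List (List (String × String))) (d : PySem.Dict String (List (List (String × String)))),
      (∀ kv ∈ d.items, kv.2 ≠ []) →
      ∀ kv ∈ (l.foldl (fun d s =>
        let code := (PySem.Dict.mk s).getD "country" ""
        let d' := if d.contains code then d else d.insert code ([] : List (List (String × String)))
        d'.modify code [] (fun l => l ++ [s])) d).items, kv.2 ≠ [] by
    intro kv hkv
    exact h stores PySem.Dict.empty (by simp [PySem.Dict.empty]) kv hkv
  intro l
  induction l with
  | nil => intro d hd; simpa using hd
  | cons s t ih =>
      intro d hd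
      rw [List.foldl_cons]
      apply ih
      intro kv hkv
      simp only [PySem.Dict.modify] at hkv
      rw [PySem.Dict.mem_items_insert] at hkv
      rcases hkv with h | ⟨hmem, hne⟩
      · subst h; simp
      · -- kv is in d' with kv.1 ≠ code; d' is d or d.insert code []
        set code := (PySem.Dict.mk s).getD "country" "" with hcode
        by_cases hcon : d.contains code
        · rw [if_pos hcon] at hmem
          exact hd kv hmem
        · rw [if_neg hcon] at hmem
          rw [PySem.Dict.mem_items_insert] at hmem
          rcases hmem with h | ⟨hmem, _⟩
          · exact absurd (congrArg Prod.fst h) hne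
          · exact hd kv hmem

-- the max loop bounds every count
theorem pv_le_maxc (xs : List (String × List (List (String × String)))) :
    ∀ kv ∈ xs, (kv.2.length : Int) ≤
      xs.foldl (fun m kv => if (kv.2.length : Int) > m then (kv.2.length : Int) else m) 0 := by
  have heq : ∀ (ys : List (String × List (List (String × String)))) (init : Int),
      ys.foldl (fun m kv => if (kv.2.length : Int) > m then (kv.2.length : Int) else m) init
      = ys.foldl (fun m kv => max m (kv.2.length : Int)) init := by
    intro ys
    induction ys with
    | nil => intro init; rfl
    | cons a t iht =>
        intro init
        rw [List.foldl_cons, List.foldl_cons, iht]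
        congr 1
        rw [max_def]
        split_ifs <;> omega
  rw [heq]
  intro kv hkv
  exact (PySem.List.le_foldl_max_int xs (fun kv => (kv.2.length : Int)) 0).2 kv hkv

-- the bucket dict holds exactly the key-classes, in input order
theorem pv_buckets_getD (xs : List (String × List (List (String × String)))) (c : Int) :
    (xs.foldl (fun d kv => d.modify (kv.2.length : Int) [] (fun l => l ++ [kv]))
      (PySem.Dict.empty : PySem.Dict Int (List (String × List (List (String × String)))))).getD c []
      = xs.filter (fun kv => decide ((kv.2.length : Int) = c)) := by
  have h := PySem.Dict.getD_foldl_modify_append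
    (l := xs.map (fun kv => ((kv.2.length : Int), kv)))
    (d := (PySem.Dict.empty : PySem.Dict Int (List (String × List (List (String × String)))))) (c := c)
  rw [List.foldl_map] at h
  rw [h]
  simp only [PySem.Dict.empty, List.filter_map, List.map_map]
  rw [show (PySem.Dict.mk ([] : List (Int × List (String × List (List (String × String)))))).getD c [] = [] from rfl,
    List.nil_append]
  simp [Function.comp_def]
  exact List.filter_congr (fun kv _ => by by_cases h : ((kv.2.length : Int) = c) <;> simp [h])

-- the central equality: Python's stable reverse sort by count = counting sort
theorem pv_main (xs : List (String × List (List (String × String))))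
    (hne : ∀ kv ∈ xs, kv.2 ≠ []) :
    PySem.List.sorted xs (fun kv => (kv.2.length : Int)) true
      = ((PySem.List.pyRange 1
            ((xs.foldl (fun m kv => if (kv.2.length : Int) > m then (kv.2.length : Int) else m) 0) + 1) 1).reverse).flatMap
          (fun c => xs.filter (fun kv => decide ((kv.2.length : Int) = c))) := by
  set key : (String × List (List (String × String))) → Int := fun kv => (kv.2.length : Int) with hkey
  set maxc : Int := xs.foldl (fun m kv => if (kv.2.length : Int) > m then (kv.2.length : Int) else m) 0 with hmaxc
  set cs : List Int := (PySem.List.pyRange 1 (maxc + 1) 1).reverse with hcs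
  have hcs_pairwise : cs.Pairwise (fun a b => b < a) := by
    rw [hcs, List.pairwise_reverse]
    exact PySem.List.pairwise_lt_pyRange_one 1 (maxc + 1)
  have hcs_nodup : cs.Nodup := by
    rw [hcs]
    exact List.nodup_reverse.2 (PySem.List.nodup_pyRange_one 1 (maxc + 1))
  have hcs_mem : ∀ c : Int, c ∈ cs ↔ 1 ≤ c ∧ c < maxc + 1 := by
    intro c
    rw [hcs, List.mem_reverse, PySem.List.mem_pyRange_one]
  apply pv_eq_of_pairwise_of_filter_eq key
  · exact PySem.List.sorted_pairwise_rev xs key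
  · exact pv_pairwise_flatMap key xs cs hcs_pairwise
  · intro c
    rw [pv_filter_sorted_rev key c xs, pv_filter_flatMap key xs cs hcs_nodup c]
    by_cases hm : c ∈ cs
    · rw [if_pos hm]
    · rw [if_neg hm]
      rw [List.filter_eq_nil_iff]
      intro kv hkv
      have h1 : 1 ≤ key kv := by
        have := hne kv hkv
        have : kv.2.length ≠ 0 := by simpa [List.length_eq_zero_iff]
        simp [hkey]; omega
      have h2 : key kv ≤ maxc := pv_le_maxc xs kv hkv
      rw [hcs_mem] at hm
      simp [hkey] at h1 h2 ⊢
      omega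

-- ===== VERDICT (by name: the statement is the Claim_ definition above) =====
theorem build_country_clusters_spec : Claim_equal_build_country_clusters := by
  intro stores countries _ _
  unfold Spec_build_country_clusters build_country_clusters build_country_clusters_alt
  dsimp only
  congr 1
  have hne := pv_group_values_ne_nil stores
  have h := pv_main (pvGroup stores).items hne
  rw [h]
  congr 1
  simp only [PySem.List.foldl_append_singleton_eq_self, pv_buckets_getD,
    PySem.List.foldl_append_eq_flatMap, List.nil_append]
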